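-- pv_equiv track=rewrite | github.com/ClaudiaSolomon/Python | Lab2/ex9.py | heights
-- ===== SOURCE A (Python) =====
-- def heights(seat_matrix):
--     list_tuples = []
--     for i in range(1, len(seat_matrix)):
--         for j in range(0, len(seat_matrix[0])):
--             for z in range(0, i):
--                 if seat_matrix[i][j] < seat_matrix[z][j]:
--                     list_tuples.append((i, j))
--     return set(list_tuples)
-- ===== SOURCE B (Python) =====
-- def heights(seat_matrix):
--     res = set()
--     if not seat_matrix:
--         return res
--     maxes = list(seat_matrix[0])
--     for i in range(1, len(seat_matrix)):
--         row = seat_matrix[i]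
--         for j, mx in enumerate(maxes):
--             if row[j] < mx:
--                 res.add((i, j))
--         maxes = [max(mx, row[j]) for j, mx in enumerate(maxes)]
--     return res
-- ===== Notes on version B (the rewrite author's own statement) =====
-- stated objective: faster
-- what changed: B replaces A's inner scan over all earlier rows (for every cell) by a running per-column maximum carried across one pass over the rows, comparing each cell against that maximum once.
import Mathlib
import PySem

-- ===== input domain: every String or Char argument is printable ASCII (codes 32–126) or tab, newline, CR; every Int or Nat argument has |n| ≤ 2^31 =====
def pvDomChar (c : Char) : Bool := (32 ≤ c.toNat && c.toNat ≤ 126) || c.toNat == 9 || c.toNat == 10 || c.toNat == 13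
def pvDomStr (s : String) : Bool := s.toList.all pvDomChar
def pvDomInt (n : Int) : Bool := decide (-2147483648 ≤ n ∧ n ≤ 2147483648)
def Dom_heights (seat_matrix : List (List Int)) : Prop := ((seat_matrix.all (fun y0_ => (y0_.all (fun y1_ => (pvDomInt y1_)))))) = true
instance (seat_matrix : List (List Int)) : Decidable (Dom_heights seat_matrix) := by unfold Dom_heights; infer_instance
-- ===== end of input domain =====

-- B replaces A's inner scan over all earlier rows by a running per-column maximum (one pass): asymptotically faster.
-- Both programs return a Python set; the list below holds its distinct elements (first-insertion order).

-- ===== PORT A =====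
def heights (seat_matrix : List (List Int)) : List (Int × Int) :=
  let list_tuples : List (Int × Int) :=
    (PySem.List.pyRange 1 (PySem.List.len seat_matrix)).foldl (fun acc i =>
      (PySem.List.pyRange 0 (PySem.List.len (PySem.List.pyGetD seat_matrix 0 []))).foldl (fun acc j =>
        (PySem.List.pyRange 0 i).foldl (fun acc z =>
          if PySem.List.pyGetD (PySem.List.pyGetD seat_matrix i []) j 0 <
             PySem.List.pyGetD (PySem.List.pyGetD seat_matrix z []) j 0
          then acc ++ [(i, j)] else acc) acc) acc) []
  PySem.Set.ofList list_tuples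

-- ===== PORT B =====
def heights_alt (seat_matrix : List (List Int)) : List (Int × Int) :=
  match seat_matrix with
  | [] => []
  | r0 :: _ =>
    let st := (PySem.List.pyRange 1 (PySem.List.len seat_matrix)).foldl
      (fun st i =>
        let row := PySem.List.pyGetD seat_matrix i []
        let res := (PySem.List.enumerate st.1).foldl
          (fun res jm => if PySem.List.pyGetD row jm.1 0 < jm.2
                         then PySem.Set.add res (i, jm.1) else res) st.2
        let maxes := (PySem.List.enumerate st.1).map
          (fun jm => max jm.2 (PySem.List.pyGetD row jm.1 0))
        (maxes, res))
      (r0, (PySem.Set.empty : PySem.Set (Int × Int)))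
    st.2

-- ===== PRECONDITION & SPEC =====
-- Pre_ excludes exactly the inputs on which A raises IndexError: some row shorter than row 0.
def Pre_heights (seat_matrix : List (List Int)) : Prop :=
  ∀ row ∈ seat_matrix, (seat_matrix.headD []).length ≤ row.length
instance (seat_matrix : List (List Int)) : Decidable (Pre_heights seat_matrix) := by
  unfold Pre_heights; infer_instance
def pvWitness_heights : List (List Int) := [[1, 2], [0, 3]]

def Spec_heights (seat_matrix : List (List Int)) (out : List (Int × Int)) : Prop := out = heights_alt seat_matrix
instance (seat_matrix : List (List Int)) (out : List (Int × Int)) : Decidable (Spec_heights seat_matrix out) := by unfold Spec_heights; infer_instance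

-- ===== CLAIM (what is proved, stated in full; the proofs are below) =====
def Claim_equal_heights : Prop := ∀ (seat_matrix : List (List Int)), Dom_heights seat_matrix → Pre_heights seat_matrix → Spec_heights seat_matrix (heights seat_matrix)

-- ===== LEMMAS AND PROOFS =====

def pvCol (m : List (List Int)) (z j : Nat) : Int := (m.getD z []).getD j 0

def pvM (m : List (List Int)) : Nat → Nat → Int
  | 0, j => pvCol m 0 j
  | n+1, j => max (pvM m n j) (pvCol m (n+1) j)

theorem lt_pvM (m : List (List Int)) (n j : Nat) (x : Int) :
    x < pvM m n j ↔ ∃ z ≤ n, x < pvCol m z j := by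
  induction n with
  | zero => simp [pvM]
  | succ n ih =>
    rw [pvM, lt_max_iff, ih]
    constructor
    · rintro (⟨z, hz, hx⟩ | hx)
      · exact ⟨z, by omega, hx⟩
      · exact ⟨n+1, le_rfl, hx⟩
    · rintro ⟨z, hz, hx⟩
      rcases Nat.lt_succ_iff_lt_or_eq.mp (Nat.lt_succ_of_le hz) with h | h
      · exact Or.inl ⟨z, by omega, hx⟩
      · exact Or.inr (h ▸ hx)

theorem pvEnumInt (xs : List Int) : ∀ s : Int,
    PySem.List.enumerate xs s = (List.range xs.length).map (fun (k : Nat) => (s + (k:Int), xs.getD k 0)) := by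
  induction xs with
  | nil => intro s; simp [PySem.List.enumerate]
  | cons x t ih =>
    intro s
    rw [PySem.List.enumerate_cons, ih (s+1)]
    rw [List.length_cons, List.range_succ_eq_map, List.map_cons, List.map_map]
    refine congrArg₂ List.cons (by simp) ?_
    apply List.map_congr_left
    intro k _
    refine Prod.ext ?_ (by simp [Function.comp])
    show s + 1 + (k:Int) = s + ((k:Nat)+1 : Nat)
    push_cast; ring

theorem pvSelfMap (xs : List Int) :
    (List.range xs.length).map (fun j => xs.getD j 0) = xs := by
  apply List.ext_getElem
  · simp
  · intro i h1 h2
    simp [List.getD_eq_getElem?_getD, List.getElem?_eq_getElem h2]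

theorem pvUpdConst (x : Int × Int) :
    ∀ (l : List (Int × Int)) (s : PySem.Set (Int × Int)), (∀ y ∈ l, y = x) →
      PySem.Set.update s l = if l.isEmpty then s else s.add x := by
  intro l
  induction l with
  | nil => intro s _; rfl
  | cons a t ih =>
    intro s h
    have ha : a = x := h a (by simp)
    have hrec := ih (s.add x) (fun y hy => h y (by simp [hy]))
    show PySem.Set.update (s.add a) t = _
    rw [ha, hrec]
    have hxx : (s.add x).add x = s.add x :=
      PySem.Set.add_of_mem ((PySem.Set.mem_add s x x).mpr (Or.inr rfl))
    cases t <;> simp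

theorem pvKey (gA : Nat → List (Int × Int)) (pt : Nat → Int × Int) (cnd : Nat → Bool)
    (hconst : ∀ k, ∀ y ∈ gA k, y = pt k) (hne : ∀ k, (gA k).isEmpty = !cnd k) :
    ∀ (ks : List Nat) (s : PySem.Set (Int × Int)),
      PySem.Set.update s (ks.flatMap gA)
        = ks.foldl (fun res k => if cnd k then PySem.Set.add res (pt k) else res) s := by
  intro ks
  induction ks with
  | nil => intro s; rfl
  | cons k t ih =>
    intro s
    rw [List.flatMap_cons]
    show List.foldl PySem.Set.add s (gA k ++ t.flatMap gA) = _
    rw [List.foldl_append]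
    have h1 : List.foldl PySem.Set.add s (gA k) = if cnd k then s.add (pt k) else s := by
      have := pvUpdConst (pt k) (gA k) s (hconst k)
      rw [show List.foldl PySem.Set.add s (gA k) = PySem.Set.update s (gA k) from rfl, this, hne k]
      cases cnd k <;> simp
    rw [h1, List.foldl_cons]
    exact ih _

theorem pvStep (r0 : List Int) (rest : List (List Int)) (n : Nat) (L : List (Int × Int)) :
    (fun (st : List Int × PySem.Set (Int × Int)) (i : Int) =>
        let row := PySem.List.pyGetD (r0 :: rest) i []
        let res := (PySem.List.enumerate st.1).foldl
          (fun res jm => if PySem.List.pyGetD row jm.1 0 < jm.2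
                         then PySem.Set.add res (i, jm.1) else res) st.2
        let maxes := (PySem.List.enumerate st.1).map
          (fun jm => max jm.2 (PySem.List.pyGetD row jm.1 0))
        (maxes, res))
      ((List.range r0.length).map (fun j => pvM (r0 :: rest) n j), PySem.Set.ofList L)
      (1 + (n : Int))
    = ((List.range r0.length).map (fun j => pvM (r0 :: rest) (n+1) j),
       PySem.Set.ofList
         ((fun (acc : List (Int × Int)) (i : Int) =>
            (PySem.List.pyRange 0 (PySem.List.len (PySem.List.pyGetD (r0 :: rest) 0 []))).foldl (fun acc j =>
              (PySem.List.pyRange 0 i).foldl (fun acc z =>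
                if PySem.List.pyGetD (PySem.List.pyGetD (r0 :: rest) i []) j 0 <
                   PySem.List.pyGetD (PySem.List.pyGetD (r0 :: rest) z []) j 0
                then acc ++ [(i, j)] else acc) acc) acc)
          L (1 + (n : Int)))) := by
  have hcast : (1 : Int) + (n : Int) = ((n+1 : Nat) : Int) := by push_cast; ring
  have hrow : PySem.List.pyGetD (r0 :: rest) (1 + (n : Int)) [] = (r0 :: rest).getD (n+1) [] := by
    rw [hcast, PySem.List.pyGetD_natCast]
  -- enumerate of the maxes list
  have hE : PySem.List.enumerate ((List.range r0.length).map (fun j => pvM (r0 :: rest) n j)) 0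
      = (List.range r0.length).map (fun (k : Nat) => ((k : Int), pvM (r0 :: rest) n k)) := by
    rw [pvEnumInt]
    simp only [List.length_map, List.length_range]
    apply List.map_congr_left
    intro k hk
    rw [PySem.List.getD_map_range _ _ _ _ (List.mem_range.mp hk)]
    simp
  -- the per-column block appended by A
  set gA : Nat → List (Int × Int) := fun k =>
    List.map (fun _ => ((1 + (n:Int)), (k:Int)))
      ((List.range (n+1)).filter (fun z =>
        decide (((r0 :: rest).getD (n+1) []).getD k 0 < ((r0 :: rest).getD z []).getD k 0))) with hgA
  -- A's row fold is an append of blocks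
  have hA : (PySem.List.pyRange 0 (PySem.List.len (PySem.List.pyGetD (r0 :: rest) 0 []))).foldl (fun acc j =>
              (PySem.List.pyRange 0 (1 + (n:Int))).foldl (fun acc z =>
                if PySem.List.pyGetD (PySem.List.pyGetD (r0 :: rest) (1 + (n:Int)) []) j 0 <
                   PySem.List.pyGetD (PySem.List.pyGetD (r0 :: rest) z []) j 0
                then acc ++ [(1 + (n:Int), j)] else acc) acc) L
      = L ++ (List.range r0.length).flatMap gA := by
    have h0 : PySem.List.pyGetD (r0 :: rest) 0 [] = r0 := PySem.List.pyGetD_zero_cons _ _ _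
    have h1 : ((1 + (n:Int)) - 0).toNat = n + 1 := by omega
    have h2 : (((r0.length : Int)) - 0).toNat = r0.length := by omega
    rw [h0, PySem.List.len_eq]
    simp only [PySem.List.pyRange_one, h1, h2, zero_add]
    rw [List.foldl_map]
    rw [PySem.List.foldl_congr_mem _ _ (fun acc k => acc ++ gA k) _ ?_]
    · exact PySem.List.foldl_append_eq_flatMap gA (List.range r0.length) L
    · intro acc k _
      rw [List.foldl_map]
      have hfi := PySem.List.foldl_append_if
        (fun z => decide (((r0 :: rest).getD (n+1) []).getD k 0 < ((r0 :: rest).getD z []).getD k 0))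
        (fun _ => ((1 + (n:Int)), (k:Int))) (List.range (n+1)) acc
      simp only [decide_eq_true_eq] at hfi
      rw [PySem.List.foldl_congr_mem _ _ (fun acc2 (z : Nat) =>
            if ((r0 :: rest).getD (n+1) []).getD k 0 < ((r0 :: rest).getD z []).getD k 0
            then acc2 ++ [(1 + (n:Int), (k:Int))] else acc2) _ ?_]
      · exact hfi
      · intro acc2 z _
        rw [hrow]
        simp only [PySem.List.pyGetD_natCast]
  set v : Nat → Int := fun k => ((r0 :: rest).getD (n+1) []).getD k 0 with hv
  have hKey := pvKey gA (fun k => ((1 + (n:Int)), (k:Int)))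
      (fun k => decide (v k < pvM (r0 :: rest) n k))
      (by
        intro k y hy
        simp only [hgA, List.mem_map, List.mem_filter] at hy
        obtain ⟨z, _, rfl⟩ := hy
        rfl)
      (by
        intro k
        by_cases hlt : v k < pvM (r0 :: rest) n k
        · obtain ⟨z, hz, hzlt⟩ := (lt_pvM _ n k _).mp hlt
          simp only [hlt, decide_true, Bool.not_true, hgA, List.isEmpty_eq_false_iff]
          have hzmem : z ∈ List.filter (fun z =>
              decide (((r0 :: rest).getD (n + 1) []).getD k 0 < ((r0 :: rest).getD z []).getD k 0))
              (List.range (n+1)) := by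
            refine List.mem_filter.mpr ⟨List.mem_range.mpr (by omega), ?_⟩
            simpa [pvCol, hv] using hzlt
          exact List.ne_nil_of_mem (List.mem_map_of_mem (f := fun _ => (1 + (n:Int), (k:Int))) hzmem)
        · simp only [hlt, decide_false, Bool.not_false, hgA, List.isEmpty_iff,
            List.map_eq_nil_iff, List.filter_eq_nil_iff]
          intro z hz
          simp only [decide_eq_true_eq, not_lt]
          by_contra hcol
          rw [not_le] at hcol
          exact hlt ((lt_pvM _ n k _).mpr ⟨z, by
            have := List.mem_range.mp hz; omega, by simpa [pvCol, hv] using hcol⟩))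
      (List.range r0.length) (PySem.Set.ofList L)
  simp only [decide_eq_true_eq] at hKey
  dsimp only
  refine Prod.ext ?_ ?_
  · -- maxes component
    rw [hE, List.map_map]
    apply List.map_congr_left
    intro k _
    simp only [Function.comp]
    rw [hrow, PySem.List.pyGetD_natCast]
    simp [pvM, pvCol]
  · -- res component
    rw [hE, List.foldl_map, hA, PySem.Set.ofList_append, hKey]
    apply PySem.List.foldl_congr_mem
    intro s k _
    rw [hrow, PySem.List.pyGetD_natCast]

theorem pvMain (r0 : List Int) (rest : List (List Int)) : ∀ n : Nat,
    ((List.range n).map (fun (k : Nat) => (1:Int) + (k:Int))).foldl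
      (fun (st : List Int × PySem.Set (Int × Int)) (i : Int) =>
        let row := PySem.List.pyGetD (r0 :: rest) i []
        let res := (PySem.List.enumerate st.1).foldl
          (fun res jm => if PySem.List.pyGetD row jm.1 0 < jm.2
                         then PySem.Set.add res (i, jm.1) else res) st.2
        let maxes := (PySem.List.enumerate st.1).map
          (fun jm => max jm.2 (PySem.List.pyGetD row jm.1 0))
        (maxes, res))
      (r0, (PySem.Set.empty : PySem.Set (Int × Int)))
    = ((List.range r0.length).map (fun j => pvM (r0 :: rest) n j),
       PySem.Set.ofList (((List.range n).map (fun (k : Nat) => (1:Int) + (k:Int))).foldl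
        (fun (acc : List (Int × Int)) (i : Int) =>
            (PySem.List.pyRange 0 (PySem.List.len (PySem.List.pyGetD (r0 :: rest) 0 []))).foldl (fun acc j =>
              (PySem.List.pyRange 0 i).foldl (fun acc z =>
                if PySem.List.pyGetD (PySem.List.pyGetD (r0 :: rest) i []) j 0 <
                   PySem.List.pyGetD (PySem.List.pyGetD (r0 :: rest) z []) j 0
                then acc ++ [(i, j)] else acc) acc) acc) [])) := by
  intro n
  induction n with
  | zero =>
    simp only [List.range_zero, List.map_nil, List.foldl_nil]
    refine Prod.ext ?_ rfl
    show r0 = _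
    have : ∀ j : Nat, pvM (r0 :: rest) 0 j = r0.getD j 0 := by intro j; simp [pvM, pvCol]
    simp only [this]
    exact (pvSelfMap r0).symm
  | succ n ih =>
    rw [List.range_succ, List.map_append]
    simp only [List.foldl_append]
    rw [ih]
    exact pvStep r0 rest n _

-- ===== VERDICT (by name: the statement is the Claim_ definition above) =====
theorem heights_spec : Claim_equal_heights := by
  intro seat_matrix _ _
  show heights seat_matrix = heights_alt seat_matrix
  cases seat_matrix with
  | nil => rfl
  | cons r0 rest =>
    have ht : ((((rest.length + 1 : Nat) : Int)) - 1).toNat = rest.length := by omega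
    simp only [heights, heights_alt, PySem.List.len_eq, List.length_cons]
    rw [PySem.List.pyRange_one 1 ((rest.length + 1 : Nat) : Int), ht,
      pvMain r0 rest rest.length]
    rfl
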